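-- pv_equiv track=rewrite | github.com/Yout-bit/NEA | Legacy/Collisions.py | initailise_map
-- ===== SOURCE A (Python) =====
-- def initailise_map(map):
--     row = []
--     fmap = []
--     Counter = 0
--     for charecter in map:
--         Counter += 1
--         row.append(charecter)
--         if Counter == (9):
--             fmap.append(row)
--             row = []
--             Counter = 0
--     return fmap
-- ===== SOURCE B (Python) =====
-- def initailise_map(map):
--     # grouper idiom: one shared iterator zipped 9 times -> consecutive 9-tuples;
--     # zip drops the incomplete trailing group, matching A's discarded partial row.
--     return [list(t) for t in zip(*[iter(map)] * 9)]
-- ===== Notes on version B (the rewrite author's own statement) =====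
-- stated objective: idiomatic
-- what changed: Replaced the manual counter/row/accumulator loop with the standard grouper idiom (zip of 9 copies of one shared iterator), which yields the 9-element rows directly and drops the incomplete tail by zip's short-circuit.
import Mathlib
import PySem

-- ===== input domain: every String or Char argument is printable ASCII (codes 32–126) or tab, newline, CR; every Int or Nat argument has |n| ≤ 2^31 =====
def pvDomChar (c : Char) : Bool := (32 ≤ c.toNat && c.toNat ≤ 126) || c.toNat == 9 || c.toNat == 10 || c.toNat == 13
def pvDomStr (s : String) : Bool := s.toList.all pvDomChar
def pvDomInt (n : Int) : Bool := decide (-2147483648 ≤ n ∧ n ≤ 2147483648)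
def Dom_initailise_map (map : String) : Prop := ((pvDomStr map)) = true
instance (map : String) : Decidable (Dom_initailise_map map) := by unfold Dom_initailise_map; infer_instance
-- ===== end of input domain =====

-- B replaces A's manual counter/row/accumulator loop with the grouper idiom (take-9 chunking); objective: idiomatic.


-- ===== PORT A =====
-- each Python character is a 1-character string
def pvStr1 (c : Char) : String := String.mk [c]

-- A's loop: state (row, fmap, Counter), step for step
def pvLoopA : List Char → List String → List (List String) → Nat → List (List String)
  | [], _, fmap, _ => fmap
  | ch :: rest, row, fmap, counter =>
    let counter' := counter + 1
    let row' := row ++ [pvStr1 ch]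
    if counter' = 9 then pvLoopA rest [] (fmap ++ [row']) 0
    else pvLoopA rest row' fmap counter'

def initailise_map (map : String) : List (List String) :=
  pvLoopA map.toList [] [] 0

-- ===== PORT B =====
-- grouper: each group is the next 9 consecutive elements of the shared iterator;
-- an incomplete trailing group is dropped (zip short-circuits)
def pvChunks (l : List Char) : List (List String) :=
  if h : 9 ≤ l.length then
    ((l.take 9).map pvStr1) :: pvChunks (l.drop 9)
  else []
termination_by l.length
decreasing_by simp [List.length_drop]; omega

def initailise_map_alt (map : String) : List (List String) :=
  pvChunks map.toList

-- ===== PRECONDITION & SPEC =====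
def Spec_initailise_map (map : String) (out : List (List String)) : Prop := out = initailise_map_alt map
instance (map : String) (out : List (List String)) : Decidable (Spec_initailise_map map out) := by unfold Spec_initailise_map; infer_instance

-- ===== CLAIM (what is proved, stated in full; the proofs are below) =====
def Claim_equal_initailise_map : Prop := ∀ (map : String), Dom_initailise_map map → Spec_initailise_map map (initailise_map map)

-- ===== LEMMAS AND PROOFS =====

-- A's loop, started with Counter = c < 9, consumes the next 9 - c characters into the
-- current row (flushing it), or returns fmap if fewer remain.
theorem pvLoopA_step (l : List Char) : ∀ (row : List String) (fmap : List (List String)) (c : Nat),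
    c < 9 →
    pvLoopA l row fmap c =
      if 9 - c ≤ l.length then
        pvLoopA (l.drop (9 - c)) [] (fmap ++ [row ++ (l.take (9 - c)).map pvStr1]) 0
      else fmap := by
  induction l with
  | nil =>
    intro row fmap c hc
    simp only [pvLoopA, List.length_nil]
    rw [if_neg (by omega)]
  | cons ch rest ih =>
    intro row fmap c hc
    by_cases h9 : c + 1 = 9
    · have hc8 : c = 8 := by omega
      subst hc8
      simp [pvLoopA]
    · have hlt : c + 1 < 9 := by omega
      rw [show pvLoopA (ch :: rest) row fmap c
            = pvLoopA rest (row ++ [pvStr1 ch]) fmap (c + 1) by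
            simp [pvLoopA, h9]]
      rw [ih (row ++ [pvStr1 ch]) fmap (c + 1) hlt]
      have hle : (9 - (c + 1) ≤ rest.length) ↔ (9 - c ≤ (ch :: rest).length) := by
        simp; omega
      by_cases hL : 9 - (c + 1) ≤ rest.length
      · have hL' : 9 - c ≤ (ch :: rest).length := hle.mp hL
        rw [if_pos hL, if_pos hL']
        have hdrop : (ch :: rest).drop (9 - c) = rest.drop (9 - (c + 1)) := by
          have : 9 - c = (9 - (c + 1)) + 1 := by omega
          simp [this]
        have htake : (ch :: rest).take (9 - c) = ch :: rest.take (9 - (c + 1)) := by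
          have : 9 - c = (9 - (c + 1)) + 1 := by omega
          simp [this]
        rw [hdrop, htake]
        simp
      · have hL' : ¬ 9 - c ≤ (ch :: rest).length := fun h => hL (hle.mpr h)
        rw [if_neg hL, if_neg hL']

-- A's loop from the initial state appends exactly B's chunks to the accumulator.
theorem pvLoopA_chunks (l : List Char) (fmap : List (List String)) :
    pvLoopA l [] fmap 0 = fmap ++ pvChunks l := by
  rw [pvLoopA_step l [] fmap 0 (by omega)]
  simp only [Nat.sub_zero, List.nil_append]
  rw [pvChunks]
  by_cases h : 9 ≤ l.length
  · simp only [if_pos h, dif_pos h]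
    rw [pvLoopA_chunks (l.drop 9) (fmap ++ [(l.take 9).map pvStr1])]
    simp
  · simp only [if_neg h, dif_neg h]
    simp
termination_by l.length
decreasing_by simp [List.length_drop]; omega

-- ===== VERDICT (by name: the statement is the Claim_ definition above) =====
theorem initailise_map_spec : Claim_equal_initailise_map := by
  intro map _
  unfold Spec_initailise_map initailise_map initailise_map_alt
  rw [pvLoopA_chunks]
  simp
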